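-- pv_equiv track=rewrite | github.com/11jolek11/Hitori | meta.py | count_repeating_numbers
-- ===== SOURCE A (Python) =====
-- def count_repeating_numbers(matrix, target):
--     count = 0
--
--     # Check horizontally
--     for row in matrix:
--         consecutive_count = 0
--         for num in row:
--             if num == target:
--                 consecutive_count += 1
--                 count += 1 if consecutive_count == 2 else 0
--             else:
--                 consecutive_count = 0
--
--     # Check vertically
--     num_rows = len(matrix)
--     num_cols = len(matrix[0])
--     for col in range(num_cols):
--         consecutive_count = 0
--         for row in range(num_rows):
--             if matrix[row][col] == target:
--                 consecutive_count += 1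
--                 count += 1 if consecutive_count == 2 else 0
--             else:
--                 consecutive_count = 0
--
--     return count
-- ===== SOURCE B (Python) =====
-- def count_repeating_numbers(matrix, target):
--     # Stateless inclusion-exclusion: a maximal run of `target` of length L
--     # has L-1 adjacent pairs and max(L-2,0) adjacent triples, so runs of
--     # length >= 2 contribute exactly (#pairs) - (#triples) each line.
--     def score(lines):
--         pairs = sum(1 for line in lines for a, b in zip(line, line[1:])
--                     if a == target and b == target)
--         triples = sum(1 for line in lines for a, b, c in zip(line, line[1:], line[2:])
--                       if a == target and b == target and c == target)
--         return pairs - triples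
--
--     columns = [[row[c] for row in matrix] for c in range(len(matrix[0]))]
--     return score(matrix) + score(columns)
-- ===== Notes on version B (the rewrite author's own statement) =====
-- stated objective: alternative
-- what changed: Replaces A's stateful running-counter scan by a stateless inclusion-exclusion count: each run of target with length >= 2 equals (#adjacent target pairs) - (#adjacent target triples), computed with zip windows over rows and over materialised columns.
import Mathlib
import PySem

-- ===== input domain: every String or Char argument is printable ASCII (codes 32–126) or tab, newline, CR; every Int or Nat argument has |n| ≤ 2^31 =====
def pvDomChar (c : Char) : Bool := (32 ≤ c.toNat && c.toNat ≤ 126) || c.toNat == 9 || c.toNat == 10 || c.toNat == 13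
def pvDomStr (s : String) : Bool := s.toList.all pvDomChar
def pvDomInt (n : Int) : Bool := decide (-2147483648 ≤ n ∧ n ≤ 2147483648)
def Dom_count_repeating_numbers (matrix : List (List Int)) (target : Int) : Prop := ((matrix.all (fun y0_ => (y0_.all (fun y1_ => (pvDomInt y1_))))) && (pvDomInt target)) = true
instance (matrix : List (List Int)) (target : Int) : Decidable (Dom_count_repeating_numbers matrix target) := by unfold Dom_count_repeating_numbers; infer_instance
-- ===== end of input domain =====

-- B replaces A's running consecutive counter by a stateless inclusion-exclusion
-- count (#adjacent target pairs − #adjacent target triples); an alternative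
-- decomposition of the same cost, not faster.

-- ===== PORT A =====
-- one step of A's inner loops: state = (consecutive_count, count)
def pvStepA (target : Int) (s : Int × Int) (num : Int) : Int × Int :=
  if num = target then
    (s.1 + 1, s.2 + if s.1 + 1 = 2 then 1 else 0)
  else
    (0, s.2)

def count_repeating_numbers (matrix : List (List Int)) (target : Int) : Int :=
  -- horizontal pass
  let count := matrix.foldl (fun c row => (row.foldl (pvStepA target) (0, c)).2) 0
  -- vertical pass; matrix[0] / matrix[row][col] are in range under Pre_
  let num_rows : Int := matrix.length
  let num_cols : Int := (PySem.List.pyGetD matrix 0 []).length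
  (PySem.List.pyRange 0 num_cols 1).foldl (fun c col =>
    ((PySem.List.pyRange 0 num_rows 1).foldl (fun s r =>
      pvStepA target s (PySem.List.pyGetD (PySem.List.pyGetD matrix r []) col 0)) (0, c)).2) count

-- ===== PORT B =====
-- Source B's pair generator 'zip(line, line[1:])' with the 0/1 sum = filtered length
def pvPairs (target : Int) (l : List Int) : Int :=
  (((l.zip l.tail).filter (fun p => p.1 == target && p.2 == target)).length : Int)

-- Source B's triple generator 'zip(line, line[1:], line[2:])'
def pvTriples (target : Int) (l : List Int) : Int :=
  (((l.zip (l.tail.zip l.tail.tail)).filter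
      (fun p => p.1 == target && p.2.1 == target && p.2.2 == target)).length : Int)

-- Source B's score(lines) = pairs − triples, summed over the lines
def pvScore (target : Int) (lines : List (List Int)) : Int :=
  (lines.map (pvPairs target)).sum - (lines.map (pvTriples target)).sum

def count_repeating_numbers_alt (matrix : List (List Int)) (target : Int) : Int :=
  -- columns = [[row[c] for row in matrix] for c in range(len(matrix[0]))]
  let columns := (PySem.List.pyRange 0 ((PySem.List.pyGetD matrix 0 []).length : Int) 1).map
    (fun col => matrix.map (fun row => PySem.List.pyGetD row col 0))
  pvScore target matrix + pvScore target columns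

-- ===== PRECONDITION & SPEC =====
-- Pre_ excludes exactly the inputs where Python A raises IndexError: the empty
-- matrix (matrix[0]) and matrices with a row shorter than row 0 (matrix[row][col]).
def Pre_count_repeating_numbers (matrix : List (List Int)) (target : Int) : Prop :=
  matrix ≠ [] ∧ ∀ row ∈ matrix, (PySem.List.pyGetD matrix 0 []).length ≤ row.length
instance (matrix : List (List Int)) (target : Int) : Decidable (Pre_count_repeating_numbers matrix target) := by unfold Pre_count_repeating_numbers; infer_instance

def pvWitness_count_repeating_numbers : List (List Int) × Int := ([[1, 1, 2], [1, 2, 2]], 1)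

def Spec_count_repeating_numbers (matrix : List (List Int)) (target : Int) (out : Int) : Prop := out = count_repeating_numbers_alt matrix target
instance (matrix : List (List Int)) (target : Int) (out : Int) : Decidable (Spec_count_repeating_numbers matrix target out) := by unfold Spec_count_repeating_numbers; infer_instance

-- ===== CLAIM (what is proved, stated in full; the proofs are below) =====
def Claim_equal_count_repeating_numbers : Prop := ∀ (matrix : List (List Int)) (target : Int), Dom_count_repeating_numbers matrix target → Pre_count_repeating_numbers matrix target → Spec_count_repeating_numbers matrix target (count_repeating_numbers matrix target)

-- ===== LEMMAS AND PROOFS =====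

-- A's running counter as a pure function of the remaining line and the counter
def pvG (target : Int) : Int → List Int → Int
  | _, [] => 0
  | cc, y :: ys =>
    (if y = target then (if cc = 1 then 1 else 0) else 0)
      + pvG target (if y = target then cc + 1 else 0) ys

-- recursive forms of the window counts
def pvP (target : Int) : List Int → Int
  | x :: y :: r => (if x = target ∧ y = target then 1 else 0) + pvP target (y :: r)
  | _ => 0

def pvT (target : Int) : List Int → Int
  | x :: y :: z :: r => (if x = target ∧ y = target ∧ z = target then 1 else 0) + pvT target (y :: z :: r)
  | _ => 0

theorem pvFoldA_eq_G (target : Int) (l : List Int) :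
    ∀ cc c : Int, (l.foldl (pvStepA target) (cc, c)).2 = c + pvG target cc l := by
  induction l with
  | nil => intro cc c; simp [pvG]
  | cons y ys ih =>
    intro cc c
    rw [List.foldl_cons]
    by_cases hy : y = target
    · have hiff : cc + 1 = 2 ↔ cc = 1 := by omega
      simp [pvStepA, hy, ih, pvG, hiff]
      try ring
    · simp only [pvStepA, if_neg hy, ih, pvG]
      ring

theorem pvPairs_eq_P (target : Int) : ∀ l, pvPairs target l = pvP target l := by
  intro l
  induction l with
  | nil => simp [pvPairs, pvP]
  | cons x xs ih =>
    cases xs with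
    | nil => simp [pvPairs, pvP]
    | cons y r =>
      have : pvPairs target (x :: y :: r)
          = (if x = target ∧ y = target then 1 else 0) + pvPairs target (y :: r) := by
        simp only [pvPairs, List.tail_cons, List.zip_cons_cons, List.filter_cons]
        by_cases h : x = target ∧ y = target
        · rw [if_pos (by simp [h.1, h.2]), if_pos h]; push_cast [List.length_cons]; ring
        · rw [if_neg (by simpa using h), if_neg h]; ring
      rw [this, ih, pvP]

theorem pvTriples_eq_T (target : Int) : ∀ l, pvTriples target l = pvT target l := by
  intro l
  induction l with
  | nil => simp [pvTriples, pvT]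
  | cons x xs ih =>
    rcases xs with _ | ⟨y, _ | ⟨z, r⟩⟩
    · simp [pvTriples, pvT]
    · simp [pvTriples, pvT]
    · have : pvTriples target (x :: y :: z :: r)
          = (if x = target ∧ y = target ∧ z = target then 1 else 0)
            + pvTriples target (y :: z :: r) := by
        simp only [pvTriples, List.tail_cons, List.zip_cons_cons, List.filter_cons]
        by_cases h : x = target ∧ y = target ∧ z = target
        · rw [if_pos (by simp [h.1, h.2.1, h.2.2]), if_pos h]; push_cast [List.length_cons]; ring
        · rw [if_neg (by simpa using h), if_neg h]; ring
      rw [this, ih, pvT]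

theorem pvP_ne_head (target x : Int) (ys : List Int) (h : x ≠ target) :
    pvP target (x :: ys) = pvP target ys := by
  cases ys <;> simp [pvP, h]

theorem pvT_ne_head (target x : Int) (ys : List Int) (h : x ≠ target) :
    pvT target (x :: ys) = pvT target ys := by
  rcases ys with _ | ⟨y, _ | ⟨z, r⟩⟩ <;> simp [pvT, h]

theorem pvT_ne_second (target x y : Int) (ys : List Int) (h : y ≠ target) :
    pvT target (x :: y :: ys) = pvT target (y :: ys) := by
  cases ys <;> simp [pvT, h]

-- cons-cons unfoldings of the recursive window counts
theorem pvP_cons2 (target x y : Int) (r : List Int) :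
    pvP target (x :: y :: r) = (if x = target ∧ y = target then 1 else 0) + pvP target (y :: r) := rfl

theorem pvT_cons3 (target x y z : Int) (r : List Int) :
    pvT target (x :: y :: z :: r)
      = (if x = target ∧ y = target ∧ z = target then 1 else 0) + pvT target (y :: z :: r) := rfl

-- the heart: A's counter from states 0 / 1 / ≥2 vs pairs − triples with the
-- corresponding virtual prefix of targets
theorem pvG_spec (target : Int) : ∀ l : List Int,
    (pvG target 0 l = pvP target l - pvT target l)
    ∧ (pvG target 1 l = pvP target (target :: l) - pvT target (target :: l))
    ∧ (∀ cc : Int, 2 ≤ cc →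
        pvG target cc l = pvP target (target :: target :: l) - pvT target (target :: target :: l) - 1) := by
  intro l
  induction l with
  | nil =>
    refine ⟨by simp [pvG, pvP, pvT], by simp [pvG, pvP, pvT], fun cc hcc => by simp [pvG, pvP, pvT]⟩
  | cons y ys ih =>
    obtain ⟨h0, h1, h2⟩ := ih
    by_cases hy : y = target
    · subst hy
      refine ⟨?_, ?_, ?_⟩
      · rw [show pvG y 0 (y :: ys) = pvG y 1 ys by norm_num [pvG]]
        exact h1
      · rw [show pvG y 1 (y :: ys) = 1 + pvG y 2 ys by norm_num [pvG], h2 2 le_rfl]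
        ring
      · intro cc hcc
        have hP3 : pvP y (y :: y :: y :: ys) = 1 + pvP y (y :: y :: ys) := by
          rw [pvP_cons2]; simp
        have hT3 : pvT y (y :: y :: y :: ys) = 1 + pvT y (y :: y :: ys) := by
          rw [pvT_cons3]; simp
        rw [show pvG y cc (y :: ys) = pvG y (cc + 1) ys by
              simp [pvG, (show ¬(cc = 1) by omega)],
          h2 (cc + 1) (by omega), hP3, hT3]
        ring
    · refine ⟨?_, ?_, ?_⟩
      · rw [show pvG target 0 (y :: ys) = pvG target 0 ys by simp [pvG, hy],
          h0, pvP_ne_head target y ys hy, pvT_ne_head target y ys hy]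
      · rw [show pvG target 1 (y :: ys) = pvG target 0 ys by simp [pvG, hy],
          h0, pvP_cons2, if_neg (by tauto),
          pvT_ne_second target target y ys hy,
          pvP_ne_head target y ys hy, pvT_ne_head target y ys hy]
        ring
      · intro cc hcc
        rw [show pvG target cc (y :: ys) = pvG target 0 ys by simp [pvG, hy],
          h0, pvP_cons2, if_pos ⟨rfl, rfl⟩, pvP_cons2, if_neg (by tauto),
          pvT_cons3, if_neg (by tauto),
          pvT_ne_second target target y ys hy,
          pvP_ne_head target y ys hy, pvT_ne_head target y ys hy]
        ring

-- per-line: A's counter loop from a fresh state = B's pairs − triples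
theorem pvLine (target : Int) (seq : List Int) (c : Int) :
    (seq.foldl (pvStepA target) (0, c)).2 = c + pvPairs target seq - pvTriples target seq := by
  rw [pvFoldA_eq_G, (pvG_spec target seq).1, pvPairs_eq_P, pvTriples_eq_T]
  ring

-- pvScore of a cons
theorem pvScore_cons (target : Int) (l : List Int) (ls : List (List Int)) :
    pvScore target (l :: ls) = (pvPairs target l - pvTriples target l) + pvScore target ls := by
  simp [pvScore]
  ring

-- horizontal pass
theorem pvHorizontal (target : Int) (matrix : List (List Int)) :
    ∀ c : Int, matrix.foldl (fun c row => (row.foldl (pvStepA target) (0, c)).2) c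
      = c + pvScore target matrix := by
  induction matrix with
  | nil => intro c; simp [pvScore]
  | cons row rows ih =>
    intro c
    rw [List.foldl_cons, pvLine target row c, ih, pvScore_cons]
    ring

-- vertical pass: A's index loop over any column list = pvScore of the materialised columns
theorem pvVertical (target : Int) (matrix : List (List Int)) (L : List Int) :
    ∀ c : Int,
      L.foldl (fun c col =>
        ((PySem.List.pyRange 0 (matrix.length : Int) 1).foldl (fun s r =>
          pvStepA target s (PySem.List.pyGetD (PySem.List.pyGetD matrix r []) col 0)) (0, c)).2) c
      = c + pvScore target (L.map (fun col => matrix.map (fun row => PySem.List.pyGetD row col 0))) := by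
  induction L with
  | nil => intro c; simp [pvScore]
  | cons col rest ih =>
    intro c
    rw [List.foldl_cons,
      PySem.List.foldl_pyRange_zero_pyGetD'
        (f := fun s row => pvStepA target s (PySem.List.pyGetD row col 0))
        (xs := matrix) (d := []) (init := ((0 : Int), c)),
      ← List.foldl_map (f := fun row => PySem.List.pyGetD row col 0) (g := pvStepA target),
      pvLine target _ c, ih, List.map_cons, pvScore_cons]
    ring

-- ===== VERDICT (by name: the statement is the Claim_ definition above) =====
theorem count_repeating_numbers_spec : Claim_equal_count_repeating_numbers := by
  intro matrix target _ _
  unfold Spec_count_repeating_numbers count_repeating_numbers count_repeating_numbers_alt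
  simp only []
  rw [pvHorizontal target matrix 0, pvVertical target matrix _ (0 + pvScore target matrix)]
  ring
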